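-- pv_equiv track=rewrite | github.com/Arjumand1/crew_srapper | backend/crew_sheets/visual_template_matching.py | _identify_unique_patterns
-- ===== SOURCE A (Python) =====
-- from typing import Dict, List, Tuple, Optional, Any
--
-- def _identify_unique_patterns(headers: List[str]) -> List[str]:
--     """Identify unique patterns in the headers."""
--     patterns = []
--
--     # Check for hierarchical patterns
--     hierarchical = [h for h in headers if h.count('_') >= 2]
--     if hierarchical:
--         patterns.append(f"Hierarchical headers: {len(hierarchical)} found")
--
--     # Check for time patterns
--     time_headers = [h for h in headers if any(
--         keyword in h.upper() for keyword in ['START', 'BREAK', 'LUNCH', 'END']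
--     )]
--     if time_headers:
--         patterns.append(f"Time tracking: {len(time_headers)} columns")
--
--     # Check for job patterns
--     job_headers = [h for h in headers if any(
--         keyword in h.upper() for keyword in ['HRS', 'HOURS', 'PCS', 'PIECE', 'WORK']
--     )]
--     if job_headers:
--         patterns.append(f"Job assignments: {len(job_headers)} columns")
--
--     return patterns
-- ===== SOURCE B (Python) =====
-- from typing import List
--
-- _TIME_KEYWORDS = ('START', 'BREAK', 'LUNCH', 'END')
-- _JOB_KEYWORDS = ('HRS', 'HOURS', 'PCS', 'PIECE', 'WORK')
--
-- def _identify_unique_patterns(headers: List[str]) -> List[str]: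
--     """Identify unique patterns in the headers (keyword-major: for each
--     keyword collect the SET of matching header indices, then report set sizes)."""
--     ups = [h.upper() for h in headers]
--
--     time_hits = set()
--     for k in _TIME_KEYWORDS:
--         time_hits.update(i for i, u in enumerate(ups) if k in u)
--
--     job_hits = set()
--     for k in _JOB_KEYWORDS:
--         job_hits.update(i for i, u in enumerate(ups) if k in u)
--
--     hier = sum(1 for h in headers if h.count('_') >= 2)
--
--     patterns = []
--     if hier:
--         patterns.append(f"Hierarchical headers: {hier} found")
--     if time_hits:
--         patterns.append(f"Time tracking: {len(time_hits)} columns")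
--     if job_hits:
--         patterns.append(f"Job assignments: {len(job_hits)} columns")
--     return patterns
-- ===== Notes on version B (the rewrite author's own statement) =====
-- stated objective: alternative
-- what changed: Inverts the traversal to keyword-major: for each time/job keyword it collects the SET of matching header indices (a union of per-keyword index sets, deduplicated by the set), reads the counts off the set sizes, and counts hierarchical headers with a generator sum, instead of A's three header-major filtering comprehensions.
import Mathlib
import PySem

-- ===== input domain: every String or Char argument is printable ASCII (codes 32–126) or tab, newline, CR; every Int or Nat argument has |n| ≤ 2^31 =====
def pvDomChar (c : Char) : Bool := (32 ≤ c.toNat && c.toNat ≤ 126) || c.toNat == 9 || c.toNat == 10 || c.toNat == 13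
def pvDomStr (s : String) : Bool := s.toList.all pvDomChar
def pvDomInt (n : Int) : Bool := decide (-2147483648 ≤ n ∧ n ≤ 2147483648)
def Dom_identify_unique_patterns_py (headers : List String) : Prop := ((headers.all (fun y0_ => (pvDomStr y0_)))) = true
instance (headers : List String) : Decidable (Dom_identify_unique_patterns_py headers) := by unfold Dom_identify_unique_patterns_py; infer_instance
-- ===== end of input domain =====

-- B inverts the traversal: keyword-major collection of matching header-index SETS (time/job) plus a generator-sum for hierarchical, vs A's three header-major filters; objective: alternative.


-- ===== PORT A =====
def pvIsHier (h : String) : Bool := decide (2 ≤ PySem.Str.count h "_")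
def pvIsTime (h : String) : Bool :=
  (["START", "BREAK", "LUNCH", "END"] : List String).any (fun k => PySem.Str.isIn k (PySem.Str.upper h))
def pvIsJob (h : String) : Bool :=
  (["HRS", "HOURS", "PCS", "PIECE", "WORK"] : List String).any (fun k => PySem.Str.isIn k (PySem.Str.upper h))

def identify_unique_patterns_py (headers : List String) : List String :=
  let patterns : List String := []
  let hierarchical := headers.filter pvIsHier
  let patterns := if hierarchical ≠ [] then
      patterns ++ ["Hierarchical headers: " ++ PySem.Int.toStr (hierarchical.length : Int) ++ " found"]
    else patterns
  let time_headers := headers.filter pvIsTime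
  let patterns := if time_headers ≠ [] then
      patterns ++ ["Time tracking: " ++ PySem.Int.toStr (time_headers.length : Int) ++ " columns"]
    else patterns
  let job_headers := headers.filter pvIsJob
  let patterns := if job_headers ≠ [] then
      patterns ++ ["Job assignments: " ++ PySem.Int.toStr (job_headers.length : Int) ++ " columns"]
    else patterns
  patterns

-- ===== PORT B =====
-- indices i of the enumerated uppercased headers whose entry contains keyword k
-- (the generator 'i for i, u in enumerate(ups) if k in u')
def pvIdx (k : String) (ups : List String) : List Int :=
  ((PySem.List.enumerate ups).filter (fun p => PySem.Str.isIn k p.2)).map (fun p => p.1)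

-- 'hits = set(); for k in ks: hits.update(...)'
def pvHits (ks : List String) (ups : List String) : PySem.Set Int :=
  ks.foldl (fun s k => PySem.Set.update s (pvIdx k ups)) PySem.Set.empty

def identify_unique_patterns_py_alt (headers : List String) : List String :=
  let ups := headers.map PySem.Str.upper
  let time_hits := pvHits ["START", "BREAK", "LUNCH", "END"] ups
  let job_hits := pvHits ["HRS", "HOURS", "PCS", "PIECE", "WORK"] ups
  let hier : Int := headers.foldl (fun acc h => if decide (2 ≤ PySem.Str.count h "_") then acc + 1 else acc) 0
  (if hier ≠ 0 then ["Hierarchical headers: " ++ PySem.Int.toStr hier ++ " found"] else []) ++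
  (if time_hits ≠ [] then ["Time tracking: " ++ PySem.Int.toStr (PySem.Set.len time_hits) ++ " columns"] else []) ++
  (if job_hits ≠ [] then ["Job assignments: " ++ PySem.Int.toStr (PySem.Set.len job_hits) ++ " columns"] else [])

-- ===== PRECONDITION & SPEC =====
def Spec_identify_unique_patterns_py (headers : List String) (out : List String) : Prop := out = identify_unique_patterns_py_alt headers
instance (headers : List String) (out : List String) : Decidable (Spec_identify_unique_patterns_py headers out) := by unfold Spec_identify_unique_patterns_py; infer_instance

-- ===== CLAIM (what is proved, stated in full; the proofs are below) =====
def Claim_equal_identify_unique_patterns_py : Prop := ∀ (headers : List String), Dom_identify_unique_patterns_py headers → Spec_identify_unique_patterns_py headers (identify_unique_patterns_py headers)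

-- ===== LEMMAS AND PROOFS =====
-- membership in the keyword-major fold
lemma mem_pvHits_fold (ks : List String) (ups : List String) (s0 : PySem.Set Int) (i : Int) :
    i ∈ ks.foldl (fun s k => PySem.Set.update s (pvIdx k ups)) s0 ↔ i ∈ s0 ∨ ∃ k ∈ ks, i ∈ pvIdx k ups := by
  induction ks generalizing s0 with
  | nil => simp
  | cons k t ih =>
    simp only [List.foldl_cons, ih, PySem.Set.mem_update, List.mem_cons]
    constructor
    · rintro ((h | h) | ⟨k', hk', h⟩)
      · exact Or.inl h
      · exact Or.inr ⟨k, Or.inl rfl, h⟩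
      · exact Or.inr ⟨k', Or.inr hk', h⟩
    · rintro (h | ⟨k', (rfl | hk'), h⟩)
      · exact Or.inl (Or.inl h)
      · exact Or.inl (Or.inr h)
      · exact Or.inr ⟨k', hk', h⟩

lemma nodup_fold_update (ks : List String) (ups : List String) :
    ∀ s0 : PySem.Set Int, s0.Nodup → (ks.foldl (fun s k => PySem.Set.update s (pvIdx k ups)) s0).Nodup := by
  induction ks with
  | nil => intro s0 h; simpa using h
  | cons k t ih =>
    intro s0 h
    exact ih _ (PySem.Set.nodup_update s0 (pvIdx k ups) h)

lemma nodup_pvHits (ks : List String) (ups : List String) : (pvHits ks ups).Nodup :=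
  nodup_fold_update ks ups PySem.Set.empty (by simp [PySem.Set.empty])

-- the index list A's filter would produce, for the combined predicate
def pvTarget (ks : List String) (ups : List String) : List Int :=
  ((PySem.List.enumerate ups).filter (fun p => ks.any (fun k => PySem.Str.isIn k p.2))).map (fun p => p.1)

lemma nodup_pvTarget (ks : List String) (ups : List String) : (pvTarget ks ups).Nodup := by
  have h := (PySem.List.pairwise_lt_enumerate ups 0).filter (fun p => ks.any (fun k => PySem.Str.isIn k p.2))
  have h2 : (pvTarget ks ups).Pairwise (· < ·) := List.Pairwise.map _ (fun a b hab => hab) h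
  exact h2.imp (fun hlt => ne_of_lt hlt)

lemma mem_pvTarget (ks : List String) (ups : List String) (i : Int) :
    i ∈ pvTarget ks ups ↔ ∃ k ∈ ks, i ∈ pvIdx k ups := by
  simp only [pvTarget, pvIdx, List.mem_map, List.mem_filter, PySem.List.mem_enumerate_iff, List.any_eq_true]
  constructor
  · rintro ⟨p, ⟨⟨j, hj, rfl⟩, ⟨k, hk, hin⟩⟩, rfl⟩
    exact ⟨k, hk, ⟨(0 + (j : Int), ups[j]), ⟨⟨j, hj, rfl⟩, hin⟩, rfl⟩⟩
  · rintro ⟨k, hk, ⟨p, ⟨⟨j, hj, rfl⟩, hin⟩, rfl⟩⟩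
    exact ⟨(0 + (j : Int), ups[j]), ⟨⟨j, hj, rfl⟩, ⟨k, hk, hin⟩⟩, rfl⟩

lemma length_pvHits (ks : List String) (ups : List String) :
    (pvHits ks ups).length = ups.countP (fun u => ks.any (fun k => PySem.Str.isIn k u)) := by
  have hperm : (pvHits ks ups).Perm (pvTarget ks ups) := by
    rw [List.perm_ext_iff_of_nodup (nodup_pvHits ks ups) (nodup_pvTarget ks ups)]
    intro i
    rw [mem_pvTarget]
    simpa [PySem.Set.empty] using mem_pvHits_fold ks ups PySem.Set.empty i
  rw [hperm.length_eq]
  unfold pvTarget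
  rw [List.length_map, ← List.countP_eq_length_filter]
  conv_rhs => rw [← PySem.List.map_snd_enumerate ups 0, List.countP_map]
  rfl

lemma countP_upper (headers : List String) (ks : List String) :
    (headers.map PySem.Str.upper).countP (fun u => ks.any (fun k => PySem.Str.isIn k u)) =
      headers.countP (fun h => ks.any (fun k => PySem.Str.isIn k (PySem.Str.upper h))) := by
  rw [List.countP_map]; rfl

-- ===== VERDICT (by name: the statement is the Claim_ definition above) =====
theorem identify_unique_patterns_py_spec : Claim_equal_identify_unique_patterns_py := by
  intro headers _
  show identify_unique_patterns_py headers = identify_unique_patterns_py_alt headers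
  have hT : (pvHits ["START", "BREAK", "LUNCH", "END"] (headers.map PySem.Str.upper)).length
      = headers.countP pvIsTime := by
    rw [length_pvHits, countP_upper]; rfl
  have hJ : (pvHits ["HRS", "HOURS", "PCS", "PIECE", "WORK"] (headers.map PySem.Str.upper)).length
      = headers.countP pvIsJob := by
    rw [length_pvHits, countP_upper]; rfl
  have hT' : (pvHits ["START", "BREAK", "LUNCH", "END"] (headers.map PySem.Str.upper)) = []
      ↔ headers.countP pvIsTime = 0 := by rw [← List.length_eq_zero_iff, hT]
  have hJ' : (pvHits ["HRS", "HOURS", "PCS", "PIECE", "WORK"] (headers.map PySem.Str.upper)) = []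
      ↔ headers.countP pvIsJob = 0 := by rw [← List.length_eq_zero_iff, hJ]
  have hH : headers.countP (fun h => decide (2 ≤ PySem.Str.count h "_")) = headers.countP pvIsHier := rfl
  unfold identify_unique_patterns_py identify_unique_patterns_py_alt
  simp only [PySem.List.foldl_count_if, zero_add, PySem.Set.len, hT, hJ, hH,
    ← List.countP_eq_length_filter]
  by_cases h1 : ∃ x ∈ headers, pvIsHier x = true <;>
  by_cases h2 : ∃ x ∈ headers, pvIsTime x = true <;>
  by_cases h3 : ∃ x ∈ headers, pvIsJob x = true <;>
    simp [h1, h2, h3, hT', hJ', List.countP_eq_zero]
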